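-- pv_equiv track=rewrite | github.com/KaomN/advent_of_code_2023 | d4/p1/main.py | check_winning_numbers
-- ===== SOURCE A (Python) =====
-- def check_winning_numbers(boards, cards):
--   points = 0
--   for number in cards:
--     if number in boards:
--       if points == 0:
--         points += 1
--       else:
--         points *= 2
--   return points
-- ===== SOURCE B (Python) =====
-- def check_winning_numbers(boards, cards):
--   count = sum(1 for n in cards if n in boards)
--   return 0 if count == 0 else 2 ** (count - 1)
-- ===== Notes on version B (the rewrite author's own statement) =====
-- stated objective: simpler
-- what changed: Replaces the iterative doubling accumulator with a single counting pass followed by the closed form 2**(count-1) (0 when count==0).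
import Mathlib
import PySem

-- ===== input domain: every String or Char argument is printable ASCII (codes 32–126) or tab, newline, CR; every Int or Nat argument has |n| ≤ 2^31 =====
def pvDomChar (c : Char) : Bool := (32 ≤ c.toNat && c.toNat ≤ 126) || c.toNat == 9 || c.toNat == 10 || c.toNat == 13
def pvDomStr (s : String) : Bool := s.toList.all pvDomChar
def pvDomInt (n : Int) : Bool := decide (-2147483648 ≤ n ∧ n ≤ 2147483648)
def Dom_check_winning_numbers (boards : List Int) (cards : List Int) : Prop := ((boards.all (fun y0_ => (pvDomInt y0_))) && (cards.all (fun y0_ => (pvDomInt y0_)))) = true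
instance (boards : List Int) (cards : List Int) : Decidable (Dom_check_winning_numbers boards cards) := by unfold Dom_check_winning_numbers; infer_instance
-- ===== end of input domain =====

-- B replaces A's iterative doubling accumulator with a counting pass and the closed form 2^(count-1) (simpler).

-- ===== PORT A =====
def check_winning_numbers (boards : List Int) (cards : List Int) : Int :=
  cards.foldl (fun points number =>
    if boards.contains number then
      (if points = 0 then points + 1 else points * 2)
    else points) 0

-- ===== PORT B =====
def check_winning_numbers_alt (boards : List Int) (cards : List Int) : Int :=
  let count : Nat := cards.foldl (fun acc n => if boards.contains n then acc + 1 else acc) 0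
  if count = 0 then 0 else 2 ^ (count - 1)

-- ===== PRECONDITION & SPEC =====
def Spec_check_winning_numbers (boards : List Int) (cards : List Int) (out : Int) : Prop := out = check_winning_numbers_alt boards cards
instance (boards : List Int) (cards : List Int) (out : Int) : Decidable (Spec_check_winning_numbers boards cards out) := by unfold Spec_check_winning_numbers; infer_instance

-- ===== CLAIM (what is proved, stated in full; the proofs are below) =====
def Claim_equal_check_winning_numbers : Prop := ∀ (boards : List Int) (cards : List Int), Dom_check_winning_numbers boards cards → Spec_check_winning_numbers boards cards (check_winning_numbers boards cards)

-- ===== LEMMAS AND PROOFS =====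

-- closed form of A's accumulator as a function of the match count
def pvScore (k : Nat) : Int := if k = 0 then 0 else 2 ^ (k - 1)

theorem pvScore_step (k : Nat) :
    (if pvScore k = 0 then pvScore k + 1 else pvScore k * 2) = pvScore (k + 1) := by
  unfold pvScore
  rcases k with _ | k
  · simp
  · have h2 : (2:Int) ^ k ≠ 0 := pow_ne_zero _ (by norm_num)
    simp [h2, pow_succ]

theorem pvFold_eq (boards : List Int) (cards : List Int) (k : Nat) :
    cards.foldl (fun points number =>
      if boards.contains number then
        (if points = 0 then points + 1 else points * 2)
      else points) (pvScore k)
    = pvScore (cards.foldl (fun acc n => if boards.contains n then acc + 1 else acc) k) := by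
  induction cards generalizing k with
  | nil => rfl
  | cons c cs ih =>
    simp only [List.foldl_cons]
    by_cases h : boards.contains c
    · simp only [h, if_pos, pvScore_step]
      exact ih (k + 1)
    · simp only [h, if_neg, Bool.false_eq_true, not_false_iff]
      exact ih k

-- ===== VERDICT (by name: the statement is the Claim_ definition above) =====
theorem check_winning_numbers_spec : Claim_equal_check_winning_numbers := by
  intro boards cards _
  show check_winning_numbers boards cards = check_winning_numbers_alt boards cards
  unfold check_winning_numbers check_winning_numbers_alt
  have h := pvFold_eq boards cards 0
  simpa [pvScore] using h
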